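-- pv_equiv track=rewrite | github.com/qingyu-qc/llm_memorization | eval/valid_sent_eval/eval_valid_firstsen.py | find_continuous_matches
-- ===== SOURCE A (Python) =====
-- def find_continuous_matches(gt_ft, res_ft):
--     match_length = 0
--     gt_len = len(gt_ft)
--     res_len = len(res_ft)
--
--     for i in range(min(gt_len, res_len)):
--         if gt_ft[i] == res_ft[i]:
--             match_length += 1
--         else:
--             break
--
--     if gt_ft == res_ft and gt_len > 0 and res_len > 0:
--         first_match = 'true'
--         matched_tokens = gt_ft
--     else:
--         first_match = 'false'
--         matched_tokens = gt_ft[:match_length] if match_length > 0 else []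
--
--     return first_match, matched_tokens, match_length
-- ===== SOURCE B (Python) =====
-- def find_continuous_matches(gt_ft, res_ft):
--     # binary search for the longest k with gt_ft[:k] == res_ft[:k]
--     # (prefix equality is monotone in k; invariant: gt_ft[:lo] == res_ft[:lo])
--     gt_len, res_len = len(gt_ft), len(res_ft)
--     lo, hi = 0, min(gt_len, res_len)
--     while lo < hi:
--         mid = (lo + hi + 1) // 2
--         if gt_ft[lo:mid] == res_ft[lo:mid]:
--             lo = mid
--         else:
--             hi = mid - 1
--     if lo == gt_len == res_len and lo > 0:
--         return 'true', gt_ft, lo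
--     return 'false', gt_ft[:lo] if lo > 0 else [], lo
-- ===== Notes on version B (the rewrite author's own statement) =====
-- stated objective: alternative
-- what changed: B finds the common-prefix length by binary search on k with slice comparisons gt_ft[lo:mid]==res_ft[lo:mid] (prefix equality is monotone in k) instead of A's linear element-by-element scan, and derives full equality from lo == len(gt) == len(res) instead of A's separate gt_ft == res_ft comparison.
import Mathlib
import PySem

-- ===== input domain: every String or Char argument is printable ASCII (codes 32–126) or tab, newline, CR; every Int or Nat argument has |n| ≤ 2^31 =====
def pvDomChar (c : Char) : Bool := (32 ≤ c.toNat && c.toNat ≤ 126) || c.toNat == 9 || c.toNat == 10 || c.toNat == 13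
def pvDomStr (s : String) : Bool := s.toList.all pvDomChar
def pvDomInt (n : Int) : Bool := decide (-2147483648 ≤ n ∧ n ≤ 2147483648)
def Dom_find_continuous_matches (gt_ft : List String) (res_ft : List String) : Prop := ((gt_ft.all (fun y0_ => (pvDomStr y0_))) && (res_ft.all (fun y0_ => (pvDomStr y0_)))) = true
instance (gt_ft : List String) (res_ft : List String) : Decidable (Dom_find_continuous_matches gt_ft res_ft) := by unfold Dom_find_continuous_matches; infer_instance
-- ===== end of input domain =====

-- B finds the common-prefix length by binary search with slice comparisons (prefix
-- equality is monotone in the length) instead of A's linear element scan, and derives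
-- full equality from the prefix length instead of A's separate list comparison;
-- objective: alternative.

-- ===== PORT A =====
-- A's `for i in range(min(gt_len, res_len))` with break: recursion over the index list;
-- pyGet? is `some` for every index of the range, the `none` arm is unreachable.
def find_continuous_matches.loop (gt_ft res_ft : List String) : List Int → Int → Int
  | [], m => m
  | i :: is, m =>
    match PySem.List.pyGet? gt_ft i, PySem.List.pyGet? res_ft i with
    | some a, some b =>
        if a = b then find_continuous_matches.loop gt_ft res_ft is (m + 1) else m
    | _, _ => m

def find_continuous_matches (gt_ft : List String) (res_ft : List String) : String × List String × Int :=
  let gt_len : Int := gt_ft.length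
  let res_len : Int := res_ft.length
  let match_length :=
    find_continuous_matches.loop gt_ft res_ft (PySem.List.pyRange 0 (min gt_len res_len) 1) 0
  if gt_ft = res_ft ∧ gt_len > 0 ∧ res_len > 0 then
    ("true", gt_ft, match_length)
  else
    ("false", if match_length > 0 then PySem.List.slice gt_ft none (some match_length) else [],
      match_length)

-- ===== PORT B =====
-- B's `while lo < hi:` binary search; fuel = hi - lo + 1 bounds the iteration count
-- (the interval shrinks strictly each step), so the fuel-0 arm is unreachable.
def find_continuous_matches_alt.bsearch (gt_ft res_ft : List String) : Nat → Int → Int → Int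
  | 0, lo, _ => lo
  | fuel + 1, lo, hi =>
    if lo < hi then
      let mid := PySem.Int.floordiv (lo + hi + 1) 2
      if PySem.List.slice gt_ft (some lo) (some mid) = PySem.List.slice res_ft (some lo) (some mid)
      then find_continuous_matches_alt.bsearch gt_ft res_ft fuel mid hi
      else find_continuous_matches_alt.bsearch gt_ft res_ft fuel lo (mid - 1)
    else lo

def find_continuous_matches_alt (gt_ft : List String) (res_ft : List String) : String × List String × Int :=
  let gt_len : Int := gt_ft.length
  let res_len : Int := res_ft.length
  let lo := find_continuous_matches_alt.bsearch gt_ft res_ft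
              (min gt_ft.length res_ft.length + 1) 0 (min gt_len res_len)
  if lo = gt_len ∧ gt_len = res_len ∧ lo > 0 then
    ("true", gt_ft, lo)
  else
    ("false", if lo > 0 then PySem.List.slice gt_ft none (some lo) else [], lo)

-- ===== PRECONDITION & SPEC =====
def Spec_find_continuous_matches (gt_ft : List String) (res_ft : List String) (out : String × List String × Int) : Prop := out = find_continuous_matches_alt gt_ft res_ft
instance (gt_ft : List String) (res_ft : List String) (out : String × List String × Int) : Decidable (Spec_find_continuous_matches gt_ft res_ft out) := by unfold Spec_find_continuous_matches; infer_instance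

-- ===== CLAIM (what is proved, stated in full; the proofs are below) =====
def Claim_equal_find_continuous_matches : Prop := ∀ (gt_ft : List String) (res_ft : List String), Dom_find_continuous_matches gt_ft res_ft → Spec_find_continuous_matches gt_ft res_ft (find_continuous_matches gt_ft res_ft)

-- ===== LEMMAS AND PROOFS =====

-- common prefix length (proof-side characterisation both programs are reduced to)
def pvCnt : List String → List String → Nat
  | a :: as, b :: bs => if a = b then pvCnt as bs + 1 else 0
  | _, _ => 0

theorem pvCnt_nil_or (gt res : List String) (h : gt = [] ∨ res = []) : pvCnt gt res = 0 := by
  rcases h with h | h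
  · subst h; cases res <;> simp [pvCnt]
  · subst h; cases gt <;> simp [pvCnt]

theorem pvCnt_cons_eq (a : String) (as bs : List String) :
    pvCnt (a :: as) (a :: bs) = pvCnt as bs + 1 := by simp [pvCnt]

theorem pvCnt_eq_iff (gt res : List String) :
    (gt = res) ↔ (pvCnt gt res = gt.length ∧ gt.length = res.length) := by
  induction gt generalizing res with
  | nil => cases res <;> simp [pvCnt]
  | cons a as ih =>
    cases res with
    | nil => simp [pvCnt]
    | cons b bs =>
      by_cases hab : a = b
      · subst hab
        rw [pvCnt_cons_eq]
        simp only [List.length_cons, List.cons.injEq, true_and]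
        rw [ih bs]
        omega
      · simp [pvCnt, hab]

-- prefix equality is monotone: take k agrees iff k ≤ common-prefix length
theorem take_eq_iff (gt res : List String) (k : Nat)
    (hk : k ≤ min gt.length res.length) :
    (gt.take k = res.take k) ↔ k ≤ pvCnt gt res := by
  induction gt generalizing res k with
  | nil =>
    simp only [List.length_nil] at hk
    have : k = 0 := by omega
    subst this; simp
  | cons a as ih =>
    cases res with
    | nil =>
      simp only [List.length_nil] at hk
      have : k = 0 := by omega
      subst this; simp
    | cons b bs =>
      cases k with
      | zero => simp
      | succ j =>
        simp only [List.take_succ_cons, List.cons.injEq]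
        by_cases hab : a = b
        · subst hab
          rw [pvCnt_cons_eq]
          simp only [List.length_cons] at hk
          simp only [true_and]
          rw [ih bs j (by omega)]
          omega
        · simp [pvCnt, hab]

-- the middle slice agrees iff the longer prefix agrees, given the shorter one does
theorem mid_slice_iff (gt res : List String) (l m : Nat)
    (hl : l ≤ pvCnt gt res) (hlm : l ≤ m) (hm : m ≤ min gt.length res.length) :
    ((gt.drop l).take (m - l) = (res.drop l).take (m - l)) ↔ m ≤ pvCnt gt res := by
  have hlmin : l ≤ min gt.length res.length := le_trans hlm hm
  have hlo : gt.take l = res.take l := (take_eq_iff gt res l hlmin).mpr hl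
  have hg : gt.take m = gt.take l ++ (gt.drop l).take (m - l) := by
    rw [← List.take_add]; congr 1; omega
  have hr : res.take m = res.take l ++ (res.drop l).take (m - l) := by
    rw [← List.take_add]; congr 1; omega
  rw [← take_eq_iff gt res m hm, hg, hr, ← hlo]
  exact ⟨fun h => by rw [h], List.append_cancel_left⟩

theorem pvCnt_le_min (gt res : List String) : pvCnt gt res ≤ min gt.length res.length := by
  induction gt generalizing res with
  | nil => cases res <;> simp [pvCnt]
  | cons a as ih =>
    cases res with
    | nil => simp [pvCnt]
    | cons b bs =>
      by_cases hab : a = b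
      · subst hab
        rw [pvCnt_cons_eq]
        have := ih bs
        simp only [List.length_cons]
        omega
      · simp [pvCnt, hab]

theorem bsearch_eq (gt res : List String) : ∀ (fuel : Nat) (lo hi : Int),
    0 ≤ lo → lo ≤ (pvCnt gt res : Int) → (pvCnt gt res : Int) ≤ hi →
    hi ≤ min gt.length res.length → hi - lo < fuel →
    find_continuous_matches_alt.bsearch gt res fuel lo hi = pvCnt gt res := by
  intro fuel
  induction fuel with
  | zero => intro lo hi _ h1 h2 _ hf; omega
  | succ n ih =>
    intro lo hi h0 h1 h2 h3 hf
    rw [find_continuous_matches_alt.bsearch]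
    by_cases hlt : lo < hi
    · rw [if_pos hlt]
      rw [PySem.Int.floordiv_eq_ediv_of_pos (by omega)]
      set mid := (lo + hi + 1) / 2 with hmid
      have hmb : lo + 1 ≤ mid ∧ mid ≤ hi := by omega
      have hmid0 : 0 ≤ mid := by omega
      have hcast : mid = ((mid.toNat : Nat) : Int) ∧ lo = ((lo.toNat : Nat) : Int) := by omega
      have hsl :
          (PySem.List.slice gt (some lo) (some mid) = PySem.List.slice res (some lo) (some mid))
            ↔ mid.toNat ≤ pvCnt gt res := by
        rw [PySem.List.slice_toNat gt h0 hmid0, PySem.List.slice_toNat res h0 hmid0]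
        exact mid_slice_iff gt res lo.toNat mid.toNat (by omega) (by omega) (by omega)
      by_cases hc : PySem.List.slice gt (some lo) (some mid) = PySem.List.slice res (some lo) (some mid)
      · rw [if_pos hc]
        have : mid.toNat ≤ pvCnt gt res := hsl.mp hc
        exact ih mid hi (by omega) (by omega) h2 h3 (by omega)
      · rw [if_neg hc]
        have : ¬ mid.toNat ≤ pvCnt gt res := fun h => hc (hsl.mpr h)
        exact ih lo (mid - 1) h0 h1 (by omega) (by omega) (by omega)
    · rw [if_neg hlt]; omega

theorem altm_eq (gt res : List String) :
    find_continuous_matches_alt.bsearch gt res (min gt.length res.length + 1) 0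
        (min (gt.length : Int) (res.length : Int))
      = (pvCnt gt res : Int) := by
  have hmin : min (gt.length : Int) (res.length : Int) = ((min gt.length res.length : Nat) : Int) := by
    omega
  have hcnt : pvCnt gt res ≤ min gt.length res.length := pvCnt_le_min gt res
  rw [hmin]
  exact bsearch_eq gt res _ 0 _ (le_refl _) (by omega) (by omega) (by omega) (by omega)

-- A's loop counts the common prefix
theorem loopA_aux (gt res : List String) (n : Nat) : ∀ (i : Nat) (acc : Int),
    min gt.length res.length ≤ i + n →
    find_continuous_matches.loop gt res
        (PySem.List.pyRange (i : Int) (min (gt.length : Int) (res.length : Int)) 1) acc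
      = acc + pvCnt (gt.drop i) (res.drop i) := by
  induction n with
  | zero =>
    intro i acc h
    rw [PySem.List.pyRange_one_eq_nil (by omega)]
    have : pvCnt (gt.drop i) (res.drop i) = 0 := by
      apply pvCnt_nil_or
      rcases min_le_iff.mp (by omega : min gt.length res.length ≤ i) with h' | h'
      · exact Or.inl (List.drop_eq_nil_of_le h')
      · exact Or.inr (List.drop_eq_nil_of_le h')
    simp [find_continuous_matches.loop, this]
  | succ n ih =>
    intro i acc h
    by_cases hi : i < min gt.length res.length
    · have hg : i < gt.length := by omega
      have hr : i < res.length := by omega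
      rw [PySem.List.pyRange_one_cons (by omega)]
      simp only [find_continuous_matches.loop, PySem.List.pyGet?_natCast,
        List.getElem?_eq_getElem hg, List.getElem?_eq_getElem hr]
      rw [← List.getElem_cons_drop hg, ← List.getElem_cons_drop hr]
      by_cases hab : gt[i] = res[i]
      · rw [if_pos hab]
        have : ((i : Int) + 1) = ((i + 1 : Nat) : Int) := by push_cast; ring
        rw [this, ih (i + 1) (acc + 1) (by omega)]
        rw [hab, pvCnt_cons_eq]
        push_cast; ring
      · rw [if_neg hab]
        simp [pvCnt, hab]
    · rw [PySem.List.pyRange_one_eq_nil (by omega)]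
      have : pvCnt (gt.drop i) (res.drop i) = 0 := by
        apply pvCnt_nil_or
        rcases min_le_iff.mp (by omega : min gt.length res.length ≤ i) with h' | h'
        · exact Or.inl (List.drop_eq_nil_of_le h')
        · exact Or.inr (List.drop_eq_nil_of_le h')
      simp [find_continuous_matches.loop, this]

theorem loopA (gt res : List String) :
    find_continuous_matches.loop gt res
        (PySem.List.pyRange 0 (min (gt.length : Int) (res.length : Int)) 1) 0
      = pvCnt gt res := by
  have := loopA_aux gt res (min gt.length res.length) 0 0 (by omega)
  simpa using this

-- ===== VERDICT (by name: the statement is the Claim_ definition above) =====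
theorem find_continuous_matches_spec : Claim_equal_find_continuous_matches := by
  intro gt res _
  unfold Spec_find_continuous_matches find_continuous_matches find_continuous_matches_alt
  simp only [loopA, altm_eq]
  by_cases hA : gt = res ∧ (gt.length : Int) > 0 ∧ (res.length : Int) > 0
  · have hB : (pvCnt gt res : Int) = (gt.length : Int) ∧ (gt.length : Int) = (res.length : Int) ∧
        (pvCnt gt res : Int) > 0 := by
      obtain ⟨he, h1, h2⟩ := hA
      obtain ⟨hc, hl⟩ := (pvCnt_eq_iff gt res).mp he
      refine ⟨by exact_mod_cast congrArg Nat.cast hc, by exact_mod_cast congrArg Nat.cast hl, ?_⟩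
      omega
    rw [if_pos hA, if_pos hB]
  · have hB : ¬ ((pvCnt gt res : Int) = (gt.length : Int) ∧ (gt.length : Int) = (res.length : Int) ∧
        (pvCnt gt res : Int) > 0) := by
      rintro ⟨hc, hl, hp⟩
      apply hA
      have hc' : pvCnt gt res = gt.length := by exact_mod_cast hc
      have hl' : gt.length = res.length := by exact_mod_cast hl
      exact ⟨(pvCnt_eq_iff gt res).mpr ⟨hc', hl'⟩, by omega, by omega⟩
    rw [if_neg hA, if_neg hB]
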